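-- pv_equiv track=rewrite | github.com/jjuraska/slug2slug | e2e_nlg/slot_alignment.py | mergeOrderedDicts
-- ===== SOURCE A (Python) =====
-- from collections import OrderedDict
--
-- def mergeOrderedDicts(mrs, order=None):
--     if order is None:
--         order = ["da", "name", "eatType", "food", "priceRange", "customer_rating", "area", "familyFriendly", "near",
--                  "type", "family", "hasusbport", "hdmiport", "ecorating", "screensizerange", "screensize", "pricerange", "price", "audio", "resolution", "powerconsumption", "color", "accessories", "count",
--                  "processor", "memory", "driverange", "drive", "batteryrating", "battery", "weightrange", "weight", "dimension", "design", "utility", "platform", "isforbusinesscomputing", "warranty"]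
--     merged_mr = OrderedDict()
--     for slot in order:
--         for mr in mrs:
--             if slot in mr:
--                 merged_mr[slot] = mr[slot]
--                 break
--     return merged_mr
-- ===== SOURCE B (Python) =====
-- from collections import OrderedDict
--
-- DEFAULT_ORDER = ["da", "name", "eatType", "food", "priceRange", "customer_rating", "area", "familyFriendly", "near",
--                  "type", "family", "hasusbport", "hdmiport", "ecorating", "screensizerange", "screensize", "pricerange", "price", "audio", "resolution", "powerconsumption", "color", "accessories", "count",
--                  "processor", "memory", "driverange", "drive", "batteryrating", "battery", "weightrange", "weight", "dimension", "design", "utility", "platform", "isforbusinesscomputing", "warranty"]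
--
-- def mergeOrderedDicts(mrs, order=None):
--     if order is None:
--         order = DEFAULT_ORDER
--     # single forward pass: for each slot, remember the value from the first mr containing it
--     first_seen = {}
--     for mr in mrs:
--         for slot, value in mr.items():
--             if slot not in first_seen:
--                 first_seen[slot] = value
--     # ordered emission restricted to the given order
--     merged_mr = OrderedDict()
--     for slot in order:
--         if slot in first_seen:
--             merged_mr[slot] = first_seen[slot]
--     return merged_mr
-- ===== Notes on version B (the rewrite author's own statement) =====
-- stated objective: faster
-- what changed: Instead of rescanning the whole mrs list once per slot of the order list, B makes one pass over mrs building a first-occurrence index and then emits along the order list, removing the inner scan.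
import Mathlib
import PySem

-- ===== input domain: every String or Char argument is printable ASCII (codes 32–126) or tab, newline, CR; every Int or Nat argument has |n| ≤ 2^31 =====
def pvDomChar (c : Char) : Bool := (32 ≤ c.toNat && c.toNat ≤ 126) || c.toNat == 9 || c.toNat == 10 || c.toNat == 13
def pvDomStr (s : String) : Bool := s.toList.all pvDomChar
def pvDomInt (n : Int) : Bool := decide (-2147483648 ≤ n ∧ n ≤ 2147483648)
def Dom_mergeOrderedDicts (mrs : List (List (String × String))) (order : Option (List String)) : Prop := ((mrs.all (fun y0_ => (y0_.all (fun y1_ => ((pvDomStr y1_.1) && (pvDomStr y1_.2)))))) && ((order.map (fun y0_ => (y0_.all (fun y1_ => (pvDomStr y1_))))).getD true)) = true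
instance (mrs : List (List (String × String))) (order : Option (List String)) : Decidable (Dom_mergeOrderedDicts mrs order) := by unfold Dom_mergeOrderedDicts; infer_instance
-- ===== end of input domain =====

-- B replaces A's per-slot rescan of mrs by one forward pass building a first-occurrence
-- index followed by an ordered emission pass (faster: removes the inner scan).


-- ===== PORT A =====
def defaultOrder : List String :=
  ["da", "name", "eatType", "food", "priceRange", "customer_rating", "area", "familyFriendly", "near",
   "type", "family", "hasusbport", "hdmiport", "ecorating", "screensizerange", "screensize", "pricerange",
   "price", "audio", "resolution", "powerconsumption", "color", "accessories", "count",
   "processor", "memory", "driverange", "drive", "batteryrating", "battery", "weightrange", "weight",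
   "dimension", "design", "utility", "platform", "isforbusinesscomputing", "warranty"]

-- inner 'for mr in mrs: if slot in mr: merged_mr[slot] = mr[slot]; break'
def mergeA_scan (slot : String) : List (List (String × String)) → PySem.Dict String String → PySem.Dict String String
  | [], merged => merged
  | mr :: rest, merged =>
    match mr.lookup slot with
    | some v => merged.insert slot v          -- found: assign and break
    | none => mergeA_scan slot rest merged

def mergeOrderedDicts (mrs : List (List (String × String))) (order : Option (List String)) : List (String × String) :=
  let ord := order.getD defaultOrder
  (ord.foldl (fun merged slot => mergeA_scan slot mrs merged) PySem.Dict.empty).items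

-- ===== PORT B =====
def mergeOrderedDicts_alt (mrs : List (List (String × String))) (order : Option (List String)) : List (String × String) :=
  let ord := order.getD defaultOrder
  -- single forward pass: first mr containing a slot wins
  let firstSeen : PySem.Dict String String :=
    mrs.foldl (fun fs mr =>
      mr.foldl (fun fs p => if fs.contains p.1 then fs else fs.insert p.1 p.2) fs)
      PySem.Dict.empty
  -- ordered emission restricted to ord
  (ord.foldl (fun merged slot =>
      match firstSeen.get? slot with
      | some v => merged.insert slot v
      | none => merged) PySem.Dict.empty).items

-- ===== PRECONDITION & SPEC =====
def Spec_mergeOrderedDicts (mrs : List (List (String × String))) (order : Option (List String)) (out : List (String × String)) : Prop := out = mergeOrderedDicts_alt mrs order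
instance (mrs : List (List (String × String))) (order : Option (List String)) (out : List (String × String)) : Decidable (Spec_mergeOrderedDicts mrs order out) := by unfold Spec_mergeOrderedDicts; infer_instance

-- ===== CLAIM (what is proved, stated in full; the proofs are below) =====
def Claim_equal_mergeOrderedDicts : Prop := ∀ (mrs : List (List (String × String))) (order : Option (List String)), Dom_mergeOrderedDicts mrs order → Spec_mergeOrderedDicts mrs order (mergeOrderedDicts mrs order)

-- ===== LEMMAS AND PROOFS =====

-- value A's inner scan would assign for a slot: lookup in the first mr containing it
def scanFirst (slot : String) : List (List (String × String)) → Option String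
  | [] => none
  | mr :: rest => (mr.lookup slot).or (scanFirst slot rest)

theorem mergeA_scan_eq (slot : String) (mrs : List (List (String × String)))
    (merged : PySem.Dict String String) :
    mergeA_scan slot mrs merged =
      match scanFirst slot mrs with
      | some v => merged.insert slot v
      | none => merged := by
  induction mrs with
  | nil => rfl
  | cons mr rest ih =>
    simp only [mergeA_scan, scanFirst]
    cases h : mr.lookup slot with
    | some v => simp
    | none => simp [ih]

theorem inner_get? (mr : List (String × String)) (fs : PySem.Dict String String) (k : String) :
    (mr.foldl (fun fs p => if fs.contains p.1 then fs else fs.insert p.1 p.2) fs).get? k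
      = (fs.get? k).or (mr.lookup k) := by
  induction mr generalizing fs with
  | nil => simp
  | cons p rest ih =>
    simp only [List.foldl_cons, ih]
    by_cases hk : p.1 = k
    · subst hk
      by_cases hc : fs.contains p.1 = true
      · rw [PySem.Dict.contains_eq_isSome_get?] at hc
        obtain ⟨v, hv⟩ := Option.isSome_iff_exists.mp hc
        simp [PySem.Dict.contains_eq_isSome_get?, hv, List.lookup]
      · have hn : fs.get? p.1 = none := by
          rw [PySem.Dict.contains_eq_isSome_get?] at hc
          simpa using hc
        simp [hc, PySem.Dict.get?_insert_self, hn, List.lookup]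
    · have hne : (k == p.1) = false := by simpa using Ne.symm hk
      by_cases hc : fs.contains p.1 = true
      · simp [hc, List.lookup, hne]
      · simp [hc, PySem.Dict.get?_insert_of_ne _ _ (Ne.symm hk), List.lookup, hne]

theorem firstSeen_get? (mrs : List (List (String × String))) (fs : PySem.Dict String String) (k : String) :
    (mrs.foldl (fun fs mr =>
        mr.foldl (fun fs p => if fs.contains p.1 then fs else fs.insert p.1 p.2) fs) fs).get? k
      = (fs.get? k).or (scanFirst k mrs) := by
  induction mrs generalizing fs with
  | nil => simp [scanFirst]
  | cons mr rest ih =>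
    simp only [List.foldl_cons, ih, inner_get?, scanFirst, Option.or_assoc]

-- ===== VERDICT (by name: the statement is the Claim_ definition above) =====
theorem mergeOrderedDicts_spec : Claim_equal_mergeOrderedDicts := by
  intro mrs order _
  show mergeOrderedDicts mrs order = mergeOrderedDicts_alt mrs order
  simp only [mergeOrderedDicts, mergeOrderedDicts_alt]
  congr 2
  funext merged slot
  rw [mergeA_scan_eq]
  have h := firstSeen_get? mrs PySem.Dict.empty slot
  simp only [PySem.Dict.get?_empty, Option.none_or] at h
  rw [h]
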